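-- pv_equiv track=rewrite | github.com/pypi-data/pypi-mirror-157 | packages/nob/nob-0.8.2-py2.py3-none-any.whl/nob/path.py | _keep_roots
-- ===== SOURCE A (Python) =====
-- def _keep_roots(paths):
--     """Helper function to reduce a path list to the roots only"""
--     paths = sorted(paths, key=len)
--     i = 0
--     while i < len(paths):
--         if any(paths[i].startswith(p) for p in paths[:i]):
--             paths.pop(i)
--         else:
--             i += 1
--     return paths
-- ===== SOURCE B (Python) =====
-- def _keep_roots(paths):
--     """Helper function to reduce a path list to the roots only"""
--     pset = set(paths)
--     seen = set()
--     out = []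
--     for p in sorted(paths, key=len):
--         if p not in seen and all(p[:k] not in pset for k in range(len(p))):
--             out.append(p)
--         seen.add(p)
--     return out
-- ===== Notes on version B (the rewrite author's own statement) =====
-- stated objective: faster
-- what changed: A repeatedly rescans the kept prefix of the length-sorted list while popping covered paths in place (an inner startswith scan per element plus O(n) pops); B makes one pass over the length-sorted list, testing each path's own proper prefixes against a hash set of all paths built once, so the inner scan over kept roots disappears.
import Mathlib
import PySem

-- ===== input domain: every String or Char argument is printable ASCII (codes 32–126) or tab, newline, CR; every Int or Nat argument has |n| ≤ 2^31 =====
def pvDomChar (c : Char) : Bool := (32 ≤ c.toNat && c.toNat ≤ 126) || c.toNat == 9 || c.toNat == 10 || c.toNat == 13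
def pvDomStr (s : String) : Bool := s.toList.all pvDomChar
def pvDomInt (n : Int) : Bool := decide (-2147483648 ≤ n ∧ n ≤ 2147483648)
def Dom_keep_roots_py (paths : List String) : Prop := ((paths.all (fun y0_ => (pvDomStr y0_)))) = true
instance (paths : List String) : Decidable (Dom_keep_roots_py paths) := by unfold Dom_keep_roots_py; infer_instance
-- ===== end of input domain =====

-- B replaces A's quadratic pop-loop (each survivor rescanned against all kept roots) by a hash-set
-- of all paths queried with each path's own prefixes, in one pass over the length-sorted list.

-- ===== PORT A =====
-- A's while-loop over the length-sorted list, with in-place pop; i is the loop index.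
def keepRootsLoop (paths : List String) (i : Nat) : List String :=
  if h : i < paths.length then
    if (PySem.List.slice paths none (some (i : Int))).any
        (fun q => PySem.Str.startswith (PySem.List.pyGetD paths (i : Int) "") q) then
      match hp : PySem.List.pop? paths (i : Int) with
      | some r => keepRootsLoop r.2 i
      | none => paths  -- unreachable: i < len(paths), so pop? returns some
    else
      keepRootsLoop paths (i + 1)
  else paths
termination_by paths.length - i
decreasing_by
  · have := PySem.List.length_of_pop?_eq_some paths hp; omega
  · omega

def keep_roots_py (paths : List String) : List String :=
  keepRootsLoop (PySem.List.sorted paths (fun p => PySem.Str.len p)) 0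

-- ===== PORT B =====
def keep_roots_py_alt (paths : List String) : List String :=
  let pset : PySem.Set String := PySem.Set.ofList paths
  let r := (PySem.List.sorted paths (fun p => PySem.Str.len p)).foldl
    (fun (st : List String × PySem.Set String) p =>
      ( if !(PySem.Set.contains st.2 p) &&
            (PySem.List.pyRange 0 (PySem.Str.len p)).all
              (fun k => !(PySem.Set.contains pset (PySem.Str.slice p none (some k)))) then
          st.1 ++ [p]
        else st.1,
        PySem.Set.add st.2 p))
    ([], PySem.Set.empty)
  r.1

-- ===== PRECONDITION & SPEC =====
def Spec_keep_roots_py (paths : List String) (out : List String) : Prop := out = keep_roots_py_alt paths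
instance (paths : List String) (out : List String) : Decidable (Spec_keep_roots_py paths out) := by unfold Spec_keep_roots_py; infer_instance

-- ===== CLAIM (what is proved, stated in full; the proofs are below) =====
def Claim_equal_keep_roots_py : Prop := ∀ (paths : List String), Dom_keep_roots_py paths → Spec_keep_roots_py paths (keep_roots_py paths)

-- ===== LEMMAS AND PROOFS =====

-- A's loop, abstracted: `done` is the kept prefix, `todo` the unprocessed suffix.
def goA : List String → List String → List String
  | _, [] => []
  | done, p :: rest =>
    if done.any (fun q => PySem.Str.startswith p q) then goA done rest
    else p :: goA (done ++ [p]) rest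

-- B's loop, abstracted: the elements B appends after state `seen`.
def goB (pset : PySem.Set String) : PySem.Set String → List String → List String
  | _, [] => []
  | seen, p :: rest =>
    if !(PySem.Set.contains seen p) &&
        (PySem.List.pyRange 0 (PySem.Str.len p)).all
          (fun k => !(PySem.Set.contains pset (PySem.Str.slice p none (some k)))) then
      p :: goB pset (PySem.Set.add seen p) rest
    else goB pset (PySem.Set.add seen p) rest

lemma loopA_eq (todo : List String) : ∀ (done : List String),
    keepRootsLoop (done ++ todo) done.length = done ++ goA done todo := by
  induction todo with
  | nil =>
    intro done
    rw [keepRootsLoop]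
    simp [goA]
  | cons p rest ih =>
    intro done
    have hlen : done.length < (done ++ p :: rest).length := by simp
    have hslice : PySem.List.slice (done ++ p :: rest) none (some ((done.length : Nat) : Int)) = done := by
      rw [PySem.List.slice_to_natCast]; exact List.take_left
    have hget : PySem.List.pyGetD (done ++ p :: rest) ((done.length : Nat) : Int) "" = p := by
      rw [PySem.List.pyGetD_natCast]; simp
    have herase : (done ++ p :: rest).eraseIdx done.length = done ++ rest := by
      induction done with
      | nil => simp
      | cons a t iht => simp [iht]
    have hgetE : (done ++ p :: rest)[done.length]'hlen = p := by
      rw [List.getElem_append_right (Nat.le_refl _)]; simp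
    have hpop : PySem.List.pop? (done ++ p :: rest) ((done.length : Nat) : Int) =
        some (p, done ++ rest) := by
      rw [PySem.List.pop?_natCast _ _ hlen, hgetE, herase]
    rw [keepRootsLoop, dif_pos hlen, hslice, hget]
    cases hcond : done.any (fun q => PySem.Str.startswith p q) with
    | true =>
      simp only [if_true]
      split
      · rename_i r heq
        rw [hpop] at heq
        injection heq with heq'
        subst heq'
        rw [ih done]
        have : goA done (p :: rest) = goA done rest := by
          simp only [goA]; rw [if_pos hcond]
        rw [this]
      · rename_i heq
        rw [hpop] at heq
        exact absurd heq (by simp)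
    | false =>
      simp only [Bool.false_eq_true, if_false]
      have h1 : done ++ p :: rest = (done ++ [p]) ++ rest := by simp
      have h2 : done.length + 1 = (done ++ [p]).length := by simp
      rw [h1, h2, ih (done ++ [p])]
      have : goA done (p :: rest) = p :: goA (done ++ [p]) rest := by
        simp only [goA]; rw [if_neg (by simp only [hcond]; decide)]
      rw [this]; simp

lemma foldlB_eq (pset : PySem.Set String) (todo : List String) :
    ∀ (out : List String) (seen : PySem.Set String),
    (todo.foldl
      (fun (st : List String × PySem.Set String) p =>
        ( if !(PySem.Set.contains st.2 p) &&
              (PySem.List.pyRange 0 (PySem.Str.len p)).all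
                (fun k => !(PySem.Set.contains pset (PySem.Str.slice p none (some k)))) then
            st.1 ++ [p]
          else st.1,
          PySem.Set.add st.2 p))
      (out, seen)).1 = out ++ goB pset seen todo := by
  induction todo with
  | nil => intro out seen; simp [goB]
  | cons p rest ih =>
    intro out seen
    simp only [List.foldl_cons]
    rw [ih]
    cases hc : (!(PySem.Set.contains seen p) &&
        (PySem.List.pyRange 0 (PySem.Str.len p)).all
          (fun k => !(PySem.Set.contains pset (PySem.Str.slice p none (some k))))) with
    | true =>
      have : goB pset seen (p :: rest) = p :: goB pset (PySem.Set.add seen p) rest := by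
        simp only [goB]; rw [if_pos hc]
      rw [this]; simp
    | false =>
      have : goB pset seen (p :: rest) = goB pset (PySem.Set.add seen p) rest := by
        simp only [goB]; rw [if_neg (by simp only [hc]; decide)]
      rw [this]; simp

lemma pv_set_contains_iff (s : PySem.Set String) (x : String) :
    PySem.Set.contains s x = true ↔ x ∈ s := by
  simp [PySem.Set.contains]

lemma goA_eq_goB (pset : PySem.Set String) (todo : List String) :
    ∀ (seenL done : List String) (seen : PySem.Set String),
    (seenL ++ todo).Pairwise (fun a b => PySem.Str.len a ≤ PySem.Str.len b) →
    (∀ x : String, x ∈ pset ↔ x ∈ seenL ++ todo) →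
    (∀ x : String, x ∈ seen ↔ x ∈ seenL) →
    (∀ r ∈ done, r ∈ seenL) →
    (∀ q ∈ seenL, ∃ r ∈ done, r.toList <+: q.toList) →
    goA done todo = goB pset seen todo := by
  induction todo with
  | nil => intros; rfl
  | cons p rest ih =>
    intro seenL done seen hsorted hmemP hseen hdone hcover
    have hrestlen : ∀ q ∈ rest, p.toList.length ≤ q.toList.length := by
      have htail := hsorted.sublist (List.sublist_append_right (l₁ := seenL) (l₂ := p :: rest))
      intro q hq
      have h := (List.pairwise_cons.mp htail).1 q hq
      simp only [PySem.Str.len_eq] at h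
      exact_mod_cast h
    have hslice_toList : ∀ k : Int, 0 ≤ k →
        (PySem.Str.slice p none (some k)).toList = p.toList.take k.toNat := by
      intro k hk
      simp [PySem.Str.slice, PySem.List.slice_to _ hk]
    by_cases hA : ∃ q ∈ done, q.toList <+: p.toList
    · -- A drops p; B must drop it too
      have hcondA : (done.any fun q => PySem.Str.startswith p q) = true := by
        simp only [List.any_eq_true, PySem.Str.startswith_eq, PySem.Chars.startswith_iff]
        exact hA
      have hcondB : (!(PySem.Set.contains seen p) &&
          (PySem.List.pyRange 0 (PySem.Str.len p)).all
            (fun k => !(PySem.Set.contains pset (PySem.Str.slice p none (some k))))) = false := by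
        rw [Bool.eq_false_iff]
        intro htrue
        rw [Bool.and_eq_true, Bool.not_eq_true', List.all_eq_true] at htrue
        obtain ⟨hs, hall⟩ := htrue
        rcases hA with ⟨q, hq, hpre⟩
        by_cases hqp : q = p
        · have hpseen : p ∈ seen := (hseen p).mpr (hqp ▸ hdone q hq)
          exact Bool.false_ne_true (hs ▸ (pv_set_contains_iff seen p).mpr hpseen)
        · have hlt : q.toList.length < p.toList.length := by
            refine lt_of_le_of_ne hpre.length_le (fun h => hqp ?_)
            exact String.toList_inj.mp (hpre.eq_of_length h)
          have hqslice : PySem.Str.slice p none (some (q.toList.length : Int)) = q := by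
            apply String.toList_inj.mp
            rw [hslice_toList _ (by positivity)]
            simp only [Int.toNat_natCast]
            exact ((List.prefix_iff_eq_take.mp hpre)).symm
          have hqpset : q ∈ pset := (hmemP q).mpr (List.mem_append_left _ (hdone q hq))
          have hk : (q.toList.length : Int) ∈ PySem.List.pyRange 0 (PySem.Str.len p) := by
            rw [PySem.List.mem_pyRange_one, PySem.Str.len_eq]
            exact ⟨by positivity, by exact_mod_cast hlt⟩
          have hfalse := hall _ hk
          rw [Bool.not_eq_true', hqslice] at hfalse
          exact Bool.false_ne_true (hfalse ▸ (pv_set_contains_iff pset q).mpr hqpset)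
      have hgA : goA done (p :: rest) = goA done rest := by
        simp only [goA]; rw [if_pos hcondA]
      have hgB : goB pset seen (p :: rest) = goB pset (PySem.Set.add seen p) rest := by
        simp only [goB]; rw [if_neg (by simp only [hcondB]; decide)]
      rw [hgA, hgB]
      refine ih (seenL ++ [p]) done (PySem.Set.add seen p) ?_ ?_ ?_ ?_ ?_
      · simpa using hsorted
      · intro x; rw [hmemP x]; simp
      · intro x; rw [PySem.Set.mem_add, hseen x]; simp
      · intro r hr; exact List.mem_append_left _ (hdone r hr)
      · intro q hq
        rcases List.mem_append.mp hq with h | h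
        · exact hcover q h
        · rcases List.mem_singleton.mp h with rfl
          rcases hA with ⟨r, hr, hpre⟩
          exact ⟨r, hr, hpre⟩
    · -- A keeps p; B must keep it too
      have hcondA : (done.any fun q => PySem.Str.startswith p q) = false := by
        simp only [List.any_eq_false, PySem.Str.startswith_eq]
        intro q hq
        simp only [Bool.not_eq_true]
        rw [← Bool.not_eq_true, PySem.Chars.startswith_iff]
        exact fun hpre => hA ⟨q, hq, hpre⟩
      have hnoseen : p ∉ seen := by
        intro h
        rcases hcover p ((hseen p).mp h) with ⟨r, hr, hpre⟩
        exact hA ⟨r, hr, hpre⟩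
      have hnopre : ∀ k : Int, k ∈ PySem.List.pyRange 0 (PySem.Str.len p) →
          PySem.Str.slice p none (some k) ∉ pset := by
        intro k hk hin
        rcases PySem.List.mem_pyRange_one.mp hk with ⟨hk0, hklen⟩
        rw [PySem.Str.len_eq] at hklen
        have hkl : k.toNat < p.toList.length := by omega
        have htl : (PySem.Str.slice p none (some k)).toList = p.toList.take k.toNat :=
          hslice_toList k hk0
        have hlen' : (PySem.Str.slice p none (some k)).toList.length = k.toNat := by
          rw [htl, List.length_take]; omega
        have hpre : (PySem.Str.slice p none (some k)).toList <+: p.toList := by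
          rw [htl]; exact List.take_prefix _ _
        rcases List.mem_append.mp ((hmemP _).mp hin) with h | h
        · rcases hcover _ h with ⟨r, hr, hrpre⟩
          exact hA ⟨r, hr, hrpre.trans hpre⟩
        · rcases List.mem_cons.mp h with h | h
          · rw [h] at hlen'; omega
          · have := hrestlen _ h; omega
      have hcondB : (!(PySem.Set.contains seen p) &&
          (PySem.List.pyRange 0 (PySem.Str.len p)).all
            (fun k => !(PySem.Set.contains pset (PySem.Str.slice p none (some k))))) = true := by
        simp only [Bool.and_eq_true, Bool.not_eq_true', List.all_eq_true]
        constructor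
        · simp [hnoseen]
        · intro k hk
          simp [hnopre k hk]
      have hgA : goA done (p :: rest) = p :: goA (done ++ [p]) rest := by
        simp only [goA]; rw [if_neg (by simp only [hcondA]; decide)]
      have hgB : goB pset seen (p :: rest) = p :: goB pset (PySem.Set.add seen p) rest := by
        simp only [goB]; rw [if_pos hcondB]
      rw [hgA, hgB]
      congr 1
      refine ih (seenL ++ [p]) (done ++ [p]) (PySem.Set.add seen p) ?_ ?_ ?_ ?_ ?_
      · simpa using hsorted
      · intro x; rw [hmemP x]; simp
      · intro x; rw [PySem.Set.mem_add, hseen x]; simp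
      · intro r hr
        rcases List.mem_append.mp hr with h | h
        · exact List.mem_append_left _ (hdone r h)
        · exact List.mem_append_right _ h
      · intro q hq
        rcases List.mem_append.mp hq with h | h
        · rcases hcover q h with ⟨r, hr, hpre⟩
          exact ⟨r, List.mem_append_left _ hr, hpre⟩
        · rcases List.mem_singleton.mp h with rfl
          exact ⟨q, List.mem_append_right _ (List.mem_singleton_self _), List.prefix_refl _⟩

-- ===== VERDICT (by name: the statement is the Claim_ definition above) =====
theorem keep_roots_py_spec : Claim_equal_keep_roots_py := by
  intro paths _
  unfold Spec_keep_roots_py keep_roots_py keep_roots_py_alt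
  have hA := loopA_eq (PySem.List.sorted paths (fun p => PySem.Str.len p)) []
  simp only [List.nil_append, List.length_nil] at hA
  rw [hA]
  rw [foldlB_eq]
  simp only [List.nil_append]
  refine goA_eq_goB _ _ [] [] _ ?_ ?_ ?_ ?_ ?_
  · simpa using PySem.List.sorted_pairwise paths (fun p => PySem.Str.len p)
  · intro x
    rw [PySem.Set.mem_ofList]
    simp only [List.nil_append]
    exact ((PySem.List.sorted_perm paths (fun p => PySem.Str.len p) false).mem_iff).symm
  · intro x; simp [PySem.Set.empty]
  · intro r h; simp at h
  · intro q h; simp at h
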